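-- pv_equiv track=rewrite | github.com/vatsal30/Advent-of-Code-2024 | Day 12/script.py | part_2
-- ===== SOURCE A (Python) =====
-- from collections import deque, defaultdict
--
-- DIRECTIONS = [(-1, 0), (0, 1), (1, 0), (0, -1)]
--
-- def visit_2(point, data, visited):
--   rows, cols = len(data), len(data[0])
--   queue = deque([point])
--   x, y = point
--   visited[x][y] = True
--   c = data[x][y]
--   area = 0
--   side_lookup = defaultdict(set)
--   while queue:
--     px, py = queue.popleft()
--     area += 1
--     for dx, dy in DIRECTIONS:
--       x1, y1 = px + dx, py + dy
--       if 0 <= x1 < rows and 0 <= y1 < cols and not visited[x1][y1] and data[x1][y1] == c: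
--         visited[x1][y1] = True
--         queue.append((x1, y1))
--       elif not (0 <= x1 < rows and 0 <= y1 < cols) or data[x1][y1] != c:
--         side_lookup[(dx, dy, x1 if dx != 0 else y1)].add((x1 if dx == 0 else y1))
--
--   sides = 0
--   for _, side_items in side_lookup.items():
--     sides += 1
--     sorted_side_items = sorted(side_items)
--     for i in range(1, len(sorted_side_items)):
--       if sorted_side_items[i] - sorted_side_items[i-1] != 1:
--         sides += 1
--   return area, sides
--
-- def part_2(data):
--   rows, cols = len(data), len(data[0])
--   visited = [[False] * cols for _ in range(rows)]
--   ans = 0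
--   for i in range(rows):
--     for j in range(cols):
--       if not visited[i][j]:
--         area, sides = visit_2((i, j), data, visited)
--         ans += area * sides
--   return ans
-- ===== SOURCE B (Python) =====
-- # B: same flood fill to find each region, but sides counted locally as "fence-segment
-- # starts" (corner rule) instead of A's dict-of-coordinates + sort + gap scan.
-- from collections import deque
--
-- DIRECTIONS = [(-1, 0), (0, 1), (1, 0), (0, -1)]
--
-- def part_2(data):
--   rows, cols = len(data), len(data[0])
--   visited = [[False] * cols for _ in range(rows)]
--   ans = 0
--   for i in range(rows):
--     for j in range(cols):
--       if not visited[i][j]: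
--         c = data[i][j]
--
--         def border(x, y):
--           return not (0 <= x < rows and 0 <= y < cols) or data[x][y] != c
--
--         region = []
--         visited[i][j] = True
--         queue = deque([(i, j)])
--         while queue:
--           px, py = queue.popleft()
--           region.append((px, py))
--           for dx, dy in DIRECTIONS:
--             x1, y1 = px + dx, py + dy
--             if not border(x1, y1) and not visited[x1][y1]:
--               visited[x1][y1] = True
--               queue.append((x1, y1))
--
--         rset = set(region)
--         sides = 0
--         for (px, py) in region:
--           for dx, dy in DIRECTIONS:
--             if border(px + dx, py + dy):
--               # previous cell along this fence line
--               qx, qy = (px, py - 1) if dx != 0 else (px - 1, py)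
--               if not ((qx, qy) in rset and border(qx + dx, qy + dy)):
--                 sides += 1  # this fence edge starts a new side
--         ans += len(region) * sides
--   return ans
-- ===== Notes on version B (the rewrite author's own statement) =====
-- stated objective: alternative
-- what changed: B keeps the flood fill but counts a region's sides locally as fence-segment starts (a boundary edge whose predecessor cell along the same fence line has no matching boundary edge), replacing A's defaultdict of per-direction fence coordinates with per-key sorting and gap scans; B needs no dict and no sort, at the cost of a second pass over the region with a membership set.
import Mathlib
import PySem

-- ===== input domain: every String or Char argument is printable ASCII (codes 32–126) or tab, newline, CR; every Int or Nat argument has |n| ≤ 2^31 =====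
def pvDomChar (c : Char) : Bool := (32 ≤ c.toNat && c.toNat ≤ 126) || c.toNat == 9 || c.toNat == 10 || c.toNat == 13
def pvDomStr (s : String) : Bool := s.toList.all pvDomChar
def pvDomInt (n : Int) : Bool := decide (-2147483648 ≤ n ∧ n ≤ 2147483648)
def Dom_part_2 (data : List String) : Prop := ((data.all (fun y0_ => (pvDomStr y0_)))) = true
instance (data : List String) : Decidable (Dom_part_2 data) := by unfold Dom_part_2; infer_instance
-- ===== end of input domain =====

-- B replaces A's per-direction dict of fence coordinates (sorted, gaps counted) by a local
-- "fence-segment start" (corner) count over the region's cells; same flood fill, no dict/sort.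

-- shared elementary helpers (grid access)
def pvDirs : List (Int × Int) := [(-1, 0), (0, 1), (1, 0), (0, -1)]

def pvCharAt (data : List String) (x y : Int) : Option Char :=
  (PySem.List.pyGet? data x).bind fun s => PySem.List.pyGet? s.toList y

def pvInb (rows cols x y : Int) : Bool :=
  decide (0 ≤ x ∧ x < rows ∧ 0 ≤ y ∧ y < cols)

def pvGetV (v : List (List Bool)) (x y : Int) : Bool :=
  (v.getD x.toNat []).getD y.toNat false

def pvSetV (v : List (List Bool)) (x y : Int) : List (List Bool) :=
  v.modify x.toNat (fun row => row.set y.toNat true)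

-- ===== PORT A =====
def pvStepA (data : List String) (rows cols : Int) (c : Option Char) (px py : Int)
    (st : List (Int × Int) × List (List Bool) × PySem.Dict (Int × Int × Int) (PySem.Set Int))
    (d : Int × Int) :
    List (Int × Int) × List (List Bool) × PySem.Dict (Int × Int × Int) (PySem.Set Int) :=
  let x1 := px + d.1
  let y1 := py + d.2
  if pvInb rows cols x1 y1 && !pvGetV st.2.1 x1 y1 && (pvCharAt data x1 y1 == c) then
    (st.1 ++ [(x1, y1)], pvSetV st.2.1 x1 y1, st.2.2)
  else if !pvInb rows cols x1 y1 || (pvCharAt data x1 y1 != c) then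
    (st.1, st.2.1,
      st.2.2.modify (d.1, d.2, if d.1 ≠ 0 then x1 else y1) PySem.Set.empty
        (fun s => PySem.Set.add s (if d.1 = 0 then x1 else y1)))
  else st

def pvBfsA (data : List String) (rows cols : Int) (c : Option Char) :
    Nat → List (Int × Int) → List (List Bool) →
    Int → PySem.Dict (Int × Int × Int) (PySem.Set Int) →
    Int × PySem.Dict (Int × Int × Int) (PySem.Set Int) × List (List Bool)
  | 0, _, v, area, l => (area, l, v)
  | _ + 1, [], v, area, l => (area, l, v)
  | fuel + 1, p :: qr, v, area, l =>
    let st := pvDirs.foldl (pvStepA data rows cols c p.1 p.2) (qr, v, l)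
    pvBfsA data rows cols c fuel st.1 st.2.1 (area + 1) st.2.2

def pvSidesA (l : PySem.Dict (Int × Int × Int) (PySem.Set Int)) : Int :=
  l.items.foldl (fun sides kv =>
    let ss := PySem.List.sorted kv.2 (fun t => t) false
    (PySem.List.pyRange 1 (PySem.List.len ss) 1).foldl
      (fun s i => if PySem.List.pyGetD ss i 0 - PySem.List.pyGetD ss (i - 1) 0 ≠ 1 then s + 1 else s)
      (sides + 1)) 0

def pvVisitA (data : List String) (p : Int × Int) (v : List (List Bool)) :
    (Int × Int) × List (List Bool) :=
  let rows : Int := data.length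
  let cols : Int := (data.headI.toList.length : Int)
  let v1 := pvSetV v p.1 p.2
  let c := pvCharAt data p.1 p.2
  let r := pvBfsA data rows cols c (rows.toNat * cols.toNat + 1) [p] v1 0 PySem.Dict.empty
  ((r.1, pvSidesA r.2.1), r.2.2)

def part_2 (data : List String) : Int :=
  let rows : Int := data.length
  let cols : Int := (data.headI.toList.length : Int)
  let v0 := List.replicate rows.toNat (List.replicate cols.toNat false)
  ((PySem.List.pyRange 0 rows 1).foldl (fun st i =>
    (PySem.List.pyRange 0 cols 1).foldl (fun st j =>
      if !pvGetV st.2 i j then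
        let r := pvVisitA data (i, j) st.2
        (st.1 + r.1.1 * r.1.2, r.2)
      else st) st) ((0 : Int), v0)).1

-- ===== PORT B =====
def pvBorder (data : List String) (rows cols : Int) (c : Option Char) (x y : Int) : Bool :=
  !pvInb rows cols x y || (pvCharAt data x y != c)

def pvFloodB (data : List String) (rows cols : Int) (c : Option Char) :
    Nat → List (Int × Int) → List (List Bool) → List (Int × Int) →
    List (Int × Int) × List (List Bool)
  | 0, _, v, reg => (reg, v)
  | _ + 1, [], v, reg => (reg, v)
  | fuel + 1, p :: qr, v, reg =>
    let st := pvDirs.foldl (fun (st : List (Int × Int) × List (List Bool)) d =>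
      let x1 := p.1 + d.1
      let y1 := p.2 + d.2
      if !pvBorder data rows cols c x1 y1 && !pvGetV st.2 x1 y1 then
        (st.1 ++ [(x1, y1)], pvSetV st.2 x1 y1)
      else st) (qr, v)
    pvFloodB data rows cols c fuel st.1 st.2 (reg ++ [p])

def pvPrev (p d : Int × Int) : Int × Int :=
  if d.1 ≠ 0 then (p.1, p.2 - 1) else (p.1 - 1, p.2)

def pvSidesB (data : List String) (rows cols : Int) (c : Option Char)
    (reg : List (Int × Int)) : Int :=
  let rset := PySem.Set.ofList reg
  reg.foldl (fun sides p =>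
    pvDirs.foldl (fun s d =>
      if pvBorder data rows cols c (p.1 + d.1) (p.2 + d.2) then
        if !(rset.contains (pvPrev p d) &&
             pvBorder data rows cols c ((pvPrev p d).1 + d.1) ((pvPrev p d).2 + d.2)) then s + 1
        else s
      else s) sides) 0

def part_2_alt (data : List String) : Int :=
  let rows : Int := data.length
  let cols : Int := (data.headI.toList.length : Int)
  let v0 := List.replicate rows.toNat (List.replicate cols.toNat false)
  ((PySem.List.pyRange 0 rows 1).foldl (fun st i =>
    (PySem.List.pyRange 0 cols 1).foldl (fun st j =>
      if !pvGetV st.2 i j then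
        let c := pvCharAt data i j
        let r := pvFloodB data rows cols c (rows.toNat * cols.toNat + 1) [(i, j)]
          (pvSetV st.2 i j) []
        (st.1 + (r.1.length : Int) * pvSidesB data rows cols c r.1, r.2)
      else st) st) ((0 : Int), v0)).1

-- ===== PRECONDITION & SPEC =====
-- Pre_ excludes exactly the inputs where Python A raises IndexError: the empty list
-- (len(data[0])) and grids with a row shorter than the first row (data[x][y] out of range).
def Pre_part_2 (data : List String) : Prop :=
  data ≠ [] ∧ ∀ s ∈ data, data.headI.toList.length ≤ s.toList.length
instance (data : List String) : Decidable (Pre_part_2 data) := by unfold Pre_part_2; infer_instance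

def pvWitness_part_2 : List String := ["AAB", "ABB"]

def Spec_part_2 (data : List String) (out : Int) : Prop := out = part_2_alt data
instance (data : List String) (out : Int) : Decidable (Spec_part_2 data out) := by unfold Spec_part_2; infer_instance

-- ===== CLAIM (what is proved, stated in full; the proofs are below) =====
def Claim_equal_part_2 : Prop := ∀ (data : List String), Dom_part_2 data → Pre_part_2 data → Spec_part_2 data (part_2 data)

-- ===== LEMMAS AND PROOFS =====

-- proof-side definitions ------------------------------------------------------

def pvStepB (data : List String) (rows cols : Int) (c : Option Char) (p : Int × Int)
    (st : List (Int × Int) × List (List Bool)) (d : Int × Int) :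
    List (Int × Int) × List (List Bool) :=
  let x1 := p.1 + d.1
  let y1 := p.2 + d.2
  if !pvBorder data rows cols c x1 y1 && !pvGetV st.2 x1 y1 then
    (st.1 ++ [(x1, y1)], pvSetV st.2 x1 y1)
  else st

def pvKV (p d : Int × Int) : (Int × Int × Int) × Int :=
  ((d.1, d.2, if d.1 ≠ 0 then p.1 + d.1 else p.2 + d.2),
   if d.1 = 0 then p.1 + d.1 else p.2 + d.2)

def pvIns (l : PySem.Dict (Int × Int × Int) (PySem.Set Int)) (kv : (Int × Int × Int) × Int) :
    PySem.Dict (Int × Int × Int) (PySem.Set Int) :=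
  l.modify kv.1 PySem.Set.empty (fun s => PySem.Set.add s kv.2)

def pvEdges (data : List String) (rows cols : Int) (c : Option Char) (p : Int × Int) :
    List ((Int × Int × Int) × Int) :=
  pvDirs.filterMap (fun d =>
    if pvBorder data rows cols c (p.1 + d.1) (p.2 + d.2) then some (pvKV p d) else none)

def pvAddE (data : List String) (rows cols : Int) (c : Option Char)
    (l : PySem.Dict (Int × Int × Int) (PySem.Set Int)) (p : Int × Int) :
    PySem.Dict (Int × Int × Int) (PySem.Set Int) :=
  (pvEdges data rows cols c p).foldl pvIns l

def pvM (data : List String) (rows cols : Int) (c : Option Char) (P : List (Int × Int)) :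
    List ((Int × Int × Int) × Int) :=
  P.flatMap (pvEdges data rows cols c)

def pvCountAdj : List Int → Nat
  | a :: b :: t => (if b - a ≠ 1 then 1 else 0) + pvCountAdj (b :: t)
  | _ => 0

def pvShape (R C : Nat) (v : List (List Bool)) : Prop :=
  v.length = R ∧ ∀ (i : Nat) (h : i < v.length), (v[i]).length = C

-- visited-matrix lemmas --------------------------------------------------------

lemma pvGetV_eq (v : List (List Bool)) (a b : Int) :
    pvGetV v a b = ((v[a.toNat]?.getD [])[b.toNat]?).getD false := by
  simp [pvGetV, List.getD_eq_getElem?_getD]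

lemma pv_getV_setV_mono (v : List (List Bool)) (x y a b : Int)
    (h : pvGetV v a b = true) : pvGetV (pvSetV v x y) a b = true := by
  rw [pvGetV_eq] at h ⊢
  unfold pvSetV
  cases hrow : v[a.toNat]? with
  | none => simp [hrow] at h
  | some row =>
    cases hrb : row[b.toNat]? with
    | none => simp [hrow, hrb] at h
    | some bv =>
      have hb : b.toNat < row.length := (List.getElem?_eq_some_iff.mp hrb).1
      simp only [hrow, Option.getD_some] at h
      rw [hrb] at h
      simp only [Option.getD_some] at h
      simp only [List.getElem?_modify, hrow]
      split
      · by_cases hy : y.toNat = b.toNat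
        · have hyl : y.toNat < row.length := by omega
          simp [hy, hb]
        · simp [hy, hrb, h]
      · simp [hrb, h]

lemma pv_shape_setV {R C : Nat} {v : List (List Bool)} (hs : pvShape R C v) (x y : Int) :
    pvShape R C (pvSetV v x y) := by
  
  obtain ⟨h1, h2⟩ := hs
  refine ⟨by simpa [pvSetV] using h1, ?_⟩
  intro i h
  simp only [pvSetV, List.length_modify] at h ⊢
  rw [List.getElem_modify]
  split
  · simpa using h2 i h
  · exact h2 i h

lemma pv_getV_setV_self {R C : Nat} {v : List (List Bool)} (hs : pvShape R C v)
    (x y : Int) (hx : x.toNat < R) (hy : y.toNat < C) :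
    pvGetV (pvSetV v x y) x y = true := by
  obtain ⟨h1, h2⟩ := hs
  rw [pvGetV_eq]
  unfold pvSetV
  have hlt : x.toNat < v.length := by omega
  have hrl : y.toNat < (v[x.toNat]).length := by rw [h2 x.toNat hlt]; exact hy
  simp [List.getElem?_eq_getElem hlt, hrl]

-- BFS decomposition: A's step = B's step plus an independent dict update --------

lemma pv_stepA_decomp (data : List String) (rows cols : Int) (c : Option Char)
    (p : Int × Int) (q : List (Int × Int)) (v : List (List Bool))
    (l : PySem.Dict (Int × Int × Int) (PySem.Set Int)) (d : Int × Int) :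
    pvStepA data rows cols c p.1 p.2 (q, v, l) d =
      ((pvStepB data rows cols c p (q, v) d).1, (pvStepB data rows cols c p (q, v) d).2,
       if pvBorder data rows cols c (p.1 + d.1) (p.2 + d.2) then pvIns l (pvKV p d) else l) := by
  cases hinb : pvInb rows cols (p.1 + d.1) (p.2 + d.2) <;>
    cases heq : (pvCharAt data (p.1 + d.1) (p.2 + d.2) == c) <;>
      cases hvis : pvGetV v (p.1 + d.1) (p.2 + d.2) <;>
        simp [pvStepA, pvStepB, pvBorder, pvIns, pvKV, hinb, heq, hvis, bne]

lemma pv_dirfold_decomp (data : List String) (rows cols : Int) (c : Option Char)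
    (p : Int × Int) :
    ∀ (ds : List (Int × Int)) (q : List (Int × Int)) (v : List (List Bool))
      (l : PySem.Dict (Int × Int × Int) (PySem.Set Int)),
    ds.foldl (pvStepA data rows cols c p.1 p.2) (q, v, l) =
      ((ds.foldl (pvStepB data rows cols c p) (q, v)).1,
       (ds.foldl (pvStepB data rows cols c p) (q, v)).2,
       (ds.filterMap (fun d =>
          if pvBorder data rows cols c (p.1 + d.1) (p.2 + d.2) then some (pvKV p d) else none)).foldl
         pvIns l) := by
  intro ds
  induction ds with
  | nil => intro q v l; simp
  | cons d ds ih =>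
    intro q v l
    simp only [List.foldl_cons, List.filterMap_cons]
    rw [pv_stepA_decomp]
    by_cases hb : pvBorder data rows cols c (p.1 + d.1) (p.2 + d.2) = true
    · simp only [if_pos hb]
      rw [ih]
      rfl
    · simp only [if_neg hb]
      rw [ih]

lemma pv_floodB_cons (data : List String) (rows cols : Int) (c : Option Char)
    (fuel : Nat) (p : Int × Int) (qr : List (Int × Int)) (v : List (List Bool))
    (reg : List (Int × Int)) :
    pvFloodB data rows cols c (fuel + 1) (p :: qr) v reg =
      pvFloodB data rows cols c fuel
        (pvDirs.foldl (pvStepB data rows cols c p) (qr, v)).1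
        (pvDirs.foldl (pvStepB data rows cols c p) (qr, v)).2 (reg ++ [p]) := rfl

lemma pv_floodB_acc (data : List String) (rows cols : Int) (c : Option Char) :
    ∀ (fuel : Nat) (q : List (Int × Int)) (v : List (List Bool)) (reg : List (Int × Int)),
    pvFloodB data rows cols c fuel q v reg =
      (reg ++ (pvFloodB data rows cols c fuel q v []).1,
       (pvFloodB data rows cols c fuel q v []).2) := by
  intro fuel
  induction fuel with
  | zero => intro q v reg; simp [pvFloodB]
  | succ fuel ih =>
    intro q v reg
    cases q with
    | nil => simp [pvFloodB]
    | cons p qr =>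
      rw [pv_floodB_cons, pv_floodB_cons]
      simp only [List.nil_append]
      rw [ih, ih _ _ [p]]
      simp

lemma pv_bfsA_eq (data : List String) (rows cols : Int) (c : Option Char) :
    ∀ (fuel : Nat) (q : List (Int × Int)) (v : List (List Bool)) (area : Int)
      (l : PySem.Dict (Int × Int × Int) (PySem.Set Int)),
    pvBfsA data rows cols c fuel q v area l =
      (area + ((pvFloodB data rows cols c fuel q v []).1.length : Int),
       (pvFloodB data rows cols c fuel q v []).1.foldl (pvAddE data rows cols c) l,
       (pvFloodB data rows cols c fuel q v []).2) := by
  intro fuel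
  induction fuel with
  | zero => intro q v area l; simp [pvBfsA, pvFloodB]
  | succ fuel ih =>
    intro q v area l
    cases q with
    | nil => simp [pvBfsA, pvFloodB]
    | cons p qr =>
      show pvBfsA data rows cols c fuel _ _ (area + 1) _ = _
      rw [pv_dirfold_decomp]
      rw [pv_floodB_cons]
      simp only [List.nil_append]
      rw [pv_floodB_acc data rows cols c fuel _ _ [p]]
      rw [ih]
      have hE : (pvDirs.filterMap (fun d =>
          if pvBorder data rows cols c (p.1 + d.1) (p.2 + d.2) then some (pvKV p d) else none)) =
          pvEdges data rows cols c p := rfl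
      rw [hE]
      simp only [List.foldl_cons, List.singleton_append, List.length_cons, Prod.ext_iff]
      refine ⟨by push_cast; ring, by simp [pvAddE]⟩

-- flood-fill invariants: shape, distinct pops ----------------------------------

lemma pv_dirfoldB_inv (data : List String) (rows cols : Int) (c : Option Char) (p : Int × Int) :
    ∀ (ds : List (Int × Int)) (q : List (Int × Int)) (v : List (List Bool)),
    pvShape rows.toNat cols.toNat v → q.Nodup → (∀ r ∈ q, pvGetV v r.1 r.2 = true) →
    pvShape rows.toNat cols.toNat (ds.foldl (pvStepB data rows cols c p) (q, v)).2 ∧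
    (ds.foldl (pvStepB data rows cols c p) (q, v)).1.Nodup ∧
    (∀ r ∈ (ds.foldl (pvStepB data rows cols c p) (q, v)).1,
       pvGetV (ds.foldl (pvStepB data rows cols c p) (q, v)).2 r.1 r.2 = true) ∧
    (∀ a b, pvGetV v a b = true →
       pvGetV (ds.foldl (pvStepB data rows cols c p) (q, v)).2 a b = true) ∧
    (∀ r ∈ (ds.foldl (pvStepB data rows cols c p) (q, v)).1,
       r ∈ q ∨ pvGetV v r.1 r.2 = false) := by
  intro ds
  induction ds with
  | nil =>
    intro q v hs hnd hvis
    exact ⟨hs, hnd, hvis, fun a b h => h, fun r hr => Or.inl hr⟩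
  | cons d ds ih =>
    intro q v hs hnd hvis
    simp only [List.foldl_cons]
    by_cases hc : (!pvBorder data rows cols c (p.1 + d.1) (p.2 + d.2) &&
        !pvGetV v (p.1 + d.1) (p.2 + d.2)) = true
    · have hstep : pvStepB data rows cols c p (q, v) d =
          (q ++ [(p.1 + d.1, p.2 + d.2)], pvSetV v (p.1 + d.1) (p.2 + d.2)) := by
        simp only [pvStepB]
        rw [if_pos hc]
      rw [hstep]
      simp only [Bool.and_eq_true, Bool.not_eq_true'] at hc
      have hinb : pvInb rows cols (p.1 + d.1) (p.2 + d.2) = true := by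
        have h1 := hc.1
        simp only [pvBorder, Bool.or_eq_false_iff] at h1
        simpa using h1.1
      have hbnd : 0 ≤ p.1 + d.1 ∧ p.1 + d.1 < rows ∧ 0 ≤ p.2 + d.2 ∧ p.2 + d.2 < cols := by
        simpa [pvInb] using hinb
      have hx' : (p.1 + d.1).toNat < rows.toNat := by omega
      have hy' : (p.2 + d.2).toNat < cols.toNat := by omega
      have hnotmem : (p.1 + d.1, p.2 + d.2) ∉ q := by
        intro hm
        have := hvis _ hm
        simp only at this
        rw [hc.2] at this
        simp at this
      have hs' := pv_shape_setV hs (p.1 + d.1) (p.2 + d.2)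
      have hnd' : (q ++ [(p.1 + d.1, p.2 + d.2)]).Nodup := by
        simp only [List.nodup_append, List.nodup_singleton, true_and]
        refine ⟨hnd, ?_⟩
        intro a ha b hb
        obtain rfl := List.mem_singleton.mp hb
        exact fun h => hnotmem (h ▸ ha)
      have hvis' : ∀ r ∈ q ++ [(p.1 + d.1, p.2 + d.2)],
          pvGetV (pvSetV v (p.1 + d.1) (p.2 + d.2)) r.1 r.2 = true := by
        intro r hr
        rcases List.mem_append.mp hr with h | h
        · exact pv_getV_setV_mono _ _ _ _ _ (hvis r h)
        · simp only [List.mem_singleton] at h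
          subst h
          exact pv_getV_setV_self hs _ _ hx' hy'
      obtain ⟨i1, i2, i3, i4, i5⟩ := ih _ _ hs' hnd' hvis'
      refine ⟨i1, i2, i3, ?_, ?_⟩
      · intro a b hab
        exact i4 a b (pv_getV_setV_mono _ _ _ _ _ hab)
      · intro r hr
        rcases i5 r hr with h | h
        · rcases List.mem_append.mp h with h' | h'
          · exact Or.inl h'
          · simp only [List.mem_singleton] at h'
            subst h'
            exact Or.inr hc.2
        · right
          by_contra hT
          rw [Bool.not_eq_false] at hT
          have := pv_getV_setV_mono v (p.1 + d.1) (p.2 + d.2) r.1 r.2 hT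
          rw [this] at h
          simp at h
    · have hstep : pvStepB data rows cols c p (q, v) d = (q, v) := by
        simp only [pvStepB]
        rw [if_neg hc]
      rw [hstep]
      exact ih q v hs hnd hvis

lemma pv_floodB_inv (data : List String) (rows cols : Int) (c : Option Char) :
    ∀ (fuel : Nat) (q : List (Int × Int)) (v : List (List Bool)),
    pvShape rows.toNat cols.toNat v → q.Nodup → (∀ r ∈ q, pvGetV v r.1 r.2 = true) →
    (pvFloodB data rows cols c fuel q v []).1.Nodup ∧
    pvShape rows.toNat cols.toNat (pvFloodB data rows cols c fuel q v []).2 ∧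
    (∀ r ∈ (pvFloodB data rows cols c fuel q v []).1, r ∈ q ∨ pvGetV v r.1 r.2 = false) := by
  intro fuel
  induction fuel with
  | zero =>
    intro q v hs hnd hvis
    exact ⟨by simp [pvFloodB], hs, by simp [pvFloodB]⟩
  | succ fuel ih =>
    intro q v hs hnd hvis
    cases q with
    | nil => exact ⟨by simp [pvFloodB], hs, by simp [pvFloodB]⟩
    | cons p qr =>
      rw [pv_floodB_cons]
      simp only [List.nil_append]
      rw [pv_floodB_acc data rows cols c fuel _ _ [p]]
      obtain ⟨j1, j2, j3, j4, j5⟩ := pv_dirfoldB_inv data rows cols c p pvDirs qr v hs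
        (List.Nodup.of_cons hnd) (fun r hr => hvis r (List.mem_cons_of_mem _ hr))
      obtain ⟨k1, k2, k3⟩ := ih _ _ j1 j2 j3
      have hvp : pvGetV v p.1 p.2 = true := hvis p List.mem_cons_self
      have hpn : p ∉ (pvFloodB data rows cols c fuel
          (List.foldl (pvStepB data rows cols c p) (qr, v) pvDirs).1
          (List.foldl (pvStepB data rows cols c p) (qr, v) pvDirs).2 []).1 := by
        intro hm
        rcases k3 p hm with h | h
        · rcases j5 p h with h' | h'
          · exact (List.nodup_cons.mp hnd).1 h'
          · rw [hvp] at h'; simp at h'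
        · rw [j4 p.1 p.2 hvp] at h
          simp at h
      refine ⟨?_, k2, ?_⟩
      · simp only [List.singleton_append, List.nodup_cons]
        exact ⟨hpn, k1⟩
      · intro r hr
        simp only [List.singleton_append, List.mem_cons] at hr
        rcases hr with rfl | hr
        · exact Or.inl List.mem_cons_self
        · rcases k3 r hr with h | h
          · rcases j5 r h with h' | h'
            · exact Or.inl (List.mem_cons_of_mem _ h')
            · exact Or.inr h'
          · right
            by_contra hT
            rw [Bool.not_eq_false] at hT
            rw [j4 r.1 r.2 hT] at h
            simp at h

-- the sorted-gaps count is the number of "run starts" --------------------------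

lemma pv_countAdj_range_aux :
    ∀ (s : List Int) (a : Int),
    (List.range s.length).countP
        (fun k => decide ((a :: s).getD (k + 1) 0 - (a :: s).getD k 0 ≠ 1)) =
      pvCountAdj (a :: s) := by
  intro s
  induction s with
  | nil => intro a; simp [pvCountAdj]
  | cons b t ih =>
    intro a
    show (List.range (t.length + 1)).countP _ = _
    rw [List.range_succ_eq_map, List.countP_cons, List.countP_map]
    have hc : List.countP
        ((fun k => decide ((a :: b :: t).getD (k + 1) 0 - (a :: b :: t).getD k 0 ≠ 1)) ∘ Nat.succ)
        (List.range t.length) =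
        List.countP (fun k => decide ((b :: t).getD (k + 1) 0 - (b :: t).getD k 0 ≠ 1))
          (List.range t.length) := by
      apply List.countP_congr
      intro k _
      simp [Function.comp]
    rw [hc, ih b]
    by_cases hba : b - a = 1 <;> simp [pvCountAdj, hba, List.getD] <;> omega

lemma pv_countAdj_range (s : List Int) :
    (PySem.List.pyRange 1 (PySem.List.len s) 1).countP
        (fun i => decide (PySem.List.pyGetD s i 0 - PySem.List.pyGetD s (i - 1) 0 ≠ 1)) =
      pvCountAdj s := by
  cases s with
  | nil => simp [pvCountAdj]
  | cons a t =>
    have hlen : ((PySem.List.len (a :: t)) - 1).toNat = t.length := by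
      simp [PySem.List.len_eq]
    rw [PySem.List.pyRange_one, hlen, List.countP_map]
    rw [← pv_countAdj_range_aux t a]
    apply List.countP_congr
    intro k hk
    have h1 : (1 : Int) + (k : Int) = ((k + 1 : Nat) : Int) := by push_cast; ring
    have h2 : ((k + 1 : Nat) : Int) - 1 = ((k : Nat) : Int) := by push_cast; ring
    simp only [Function.comp, h1, h2, PySem.List.pyGetD_natCast]

lemma pv_starts_eq :
    ∀ (l : List Int) (a : Int), (a :: l).Pairwise (· < ·) →
    1 + pvCountAdj (a :: l) =
      (a :: l).countP (fun t => decide ((t - 1) ∉ (a :: l))) := by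
  intro l
  induction l with
  | nil =>
    intro a _
    have h : (a : Int) - 1 ≠ a := by omega
    simp [pvCountAdj, h]
  | cons b t ih =>
    intro a hp
    obtain ⟨h1, hbt⟩ := List.pairwise_cons.mp hp
    have hab : a < b := h1 _ List.mem_cons_self
    have hbx : ∀ x ∈ t, b < x := (List.pairwise_cons.mp hbt).1
    have hheada : ((a - 1) ∈ (a :: b :: t)) = False := by
      simp only [List.mem_cons, eq_iff_iff, iff_false, not_or]
      refine ⟨by omega, by omega, fun hm => ?_⟩
      have := h1 _ (List.mem_cons_of_mem _ hm); omega
    have hb1 : ((b - 1) ∈ (a :: b :: t)) ↔ (b - a = 1) := by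
      simp only [List.mem_cons]
      constructor
      · rintro (h | h | h)
        · omega
        · omega
        · have := hbx _ h; omega
      · intro h; left; omega
    have hpb : ((b - 1) ∈ (b :: t)) = False := by
      simp only [List.mem_cons, eq_iff_iff, iff_false, not_or]
      exact ⟨by omega, fun hm => by have := hbx _ hm; omega⟩
    have htail1 : List.countP (fun x => decide ((x - 1) ∉ (a :: b :: t))) t =
        List.countP (fun x => decide ((x - 1) ∉ (b :: t))) t := by
      apply List.countP_congr
      intro x hx
      have hbx' : b < x := hbx _ hx
      simp only [List.mem_cons, decide_eq_true_eq, not_or]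
      constructor
      · rintro ⟨_, h2, h3⟩; exact ⟨h2, h3⟩
      · rintro ⟨h2, h3⟩; exact ⟨by omega, h2, h3⟩
    have hIH := ih b hbt
    rw [List.countP_cons] at hIH
    have hA : (decide ((a - 1) ∉ (a :: b :: t))) = true := by simp [hheada]
    have hone : (decide ((b - 1) ∉ (b :: t))) = true := by simp [hpb]
    rw [hone] at hIH
    simp only [if_true] at hIH
    rw [List.countP_cons, List.countP_cons, htail1, hA]
    simp only [if_true]
    show 1 + ((if b - a ≠ 1 then 1 else 0) + pvCountAdj (b :: t)) = _
    by_cases hba : b - a = 1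
    · have hB : (decide ((b - 1) ∉ (a :: b :: t))) = false := by simp [hb1, hba]
      rw [hB]
      simp only [Bool.false_eq_true, if_false, if_neg (by omega : ¬ (b - a ≠ 1))]
      omega
    · have hB : (decide ((b - 1) ∉ (a :: b :: t))) = true := by simp [hb1, hba]
      rw [hB]
      simp only [if_true, if_pos (by omega : b - a ≠ 1)]
      omega

-- dict built by the fold: keys and values --------------------------------------

lemma pv_getD_foldl_ins :
    ∀ (M : List ((Int × Int × Int) × Int)) (d : PySem.Dict (Int × Int × Int) (PySem.Set Int))
      (k : Int × Int × Int),
    (M.foldl pvIns d).getD k PySem.Set.empty =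
      ((M.filter (fun kv => decide (kv.1 = k))).map (·.2)).foldl PySem.Set.add
        (d.getD k PySem.Set.empty) := by
  intro M
  induction M with
  | nil => intro d k; simp
  | cons kv M ih =>
    intro d k
    simp only [List.foldl_cons, List.filter_cons]
    by_cases hk : kv.1 = k
    · subst hk
      simp only [decide_true]
      rw [ih]
      have hsel : (pvIns d kv).getD kv.1 PySem.Set.empty =
          PySem.Set.add (d.getD kv.1 PySem.Set.empty) kv.2 := by
        unfold pvIns
        exact PySem.Dict.getD_modify_self d kv.1 PySem.Set.empty _
      rw [hsel]
      simp
    · have hd : (decide (kv.1 = k)) = false := by simp [hk]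
      simp only [hd, Bool.false_eq_true, if_false]
      rw [ih]
      have hoth : (pvIns d kv).getD k PySem.Set.empty = d.getD k PySem.Set.empty := by
        unfold pvIns
        exact PySem.Dict.getD_modify_of_ne d _ _ (fun h => hk h.symm)
      rw [hoth]

lemma pv_keys_foldl_ins (M : List ((Int × Int × Int) × Int)) :
    (M.foldl pvIns PySem.Dict.empty).keys = PySem.Set.ofList (M.map Prod.fst) := by
  exact PySem.Dict.keys_foldl_modify_key M Prod.fst PySem.Set.empty
    (fun _ kv s => PySem.Set.add s kv.2) PySem.Dict.empty

lemma pv_nodup_keys_foldl_ins (M : List ((Int × Int × Int) × Int)) :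
    (M.foldl pvIns PySem.Dict.empty).keys.Nodup := by
  exact PySem.Dict.nodup_keys_foldl_modify_key M Prod.fst PySem.Set.empty
    (fun _ kv s => PySem.Set.add s kv.2) PySem.Dict.empty
    (by rw [PySem.Dict.keys_empty]; exact List.nodup_nil)

-- counting partitioned by key --------------------------------------------------

lemma pv_sum_ite_single {κ : Type} [DecidableEq κ] :
    ∀ (K : List κ) (k0 : κ) (cnt : Nat), K.Nodup → k0 ∈ K →
    (K.map (fun k => if k0 = k then cnt else 0)).sum = cnt := by
  intro K
  induction K with
  | nil => intro k0 cnt h hm; simp at hm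
  | cons k K ih =>
    intro k0 cnt hnd hm
    simp only [List.map_cons, List.sum_cons]
    rcases List.mem_cons.mp hm with rfl | hm'
    · have hz : (K.map (fun k => if k0 = k then cnt else 0)).sum = 0 := by
        apply List.sum_eq_zero
        intro x hx
        rcases List.mem_map.mp hx with ⟨k', hk', rfl⟩
        have hne : k0 ≠ k' := by
          intro h; subst h; exact (List.nodup_cons.mp hnd).1 hk'
        simp [hne]
      rw [if_pos rfl, hz]
      omega
    · have hne : k0 ≠ k := by
        intro h; subst h; exact (List.nodup_cons.mp hnd).1 hm'
      rw [if_neg hne, ih k0 cnt (List.nodup_cons.mp hnd).2 hm']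
      omega

lemma pv_countP_partition {κ : Type} [DecidableEq κ]
    (q : κ × Int → Bool) :
    ∀ (M : List (κ × Int)) (K : List κ), K.Nodup → (∀ kv ∈ M, kv.1 ∈ K) →
    (K.map (fun k => (M.filter (fun kv => decide (kv.1 = k))).countP q)).sum =
      M.countP q := by
  intro M
  induction M with
  | nil => intro K hnd hcov; simp
  | cons kv M ih =>
    intro K hnd hcov
    have hcov' : ∀ p ∈ M, p.1 ∈ K := fun p hp => hcov p (List.mem_cons_of_mem _ hp)
    have hk0 : kv.1 ∈ K := hcov kv List.mem_cons_self
    rw [List.countP_cons, ← ih K hnd hcov']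
    have hsplit : ∀ k : κ, (List.filter (fun p => decide (p.1 = k)) (kv :: M)).countP q =
        (List.filter (fun p => decide (p.1 = k)) M).countP q +
          (if kv.1 = k then (if q kv then 1 else 0) else 0) := by
      intro k
      rw [List.filter_cons]
      by_cases h : kv.1 = k
      · simp [h, List.countP_cons]
      · simp [h]
    have hmapeq : (K.map (fun k => (List.filter (fun p => decide (p.1 = k)) (kv :: M)).countP q)).sum
        = (K.map (fun k => (List.filter (fun p => decide (p.1 = k)) M).countP q)).sum
          + (K.map (fun k => if kv.1 = k then (if q kv then 1 else 0) else 0)).sum := by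
      rw [← List.sum_map_add]
      congr 1
      apply List.map_congr_left
      intro k _
      rw [hsplit k]
    rw [hmapeq, pv_sum_ite_single K kv.1 _ hnd hk0]

-- geometry of keys/coordinates -------------------------------------------------

lemma pv_pvKV_inj {p d p' d' : Int × Int}
    (h : pvKV p d = pvKV p' d') : p = p' ∧ d = d' := by
  obtain ⟨pa, pb⟩ := p
  obtain ⟨qa, qb⟩ := p'
  obtain ⟨da, db⟩ := d
  obtain ⟨ea, eb⟩ := d'
  simp only [pvKV, Prod.mk.injEq] at h
  obtain ⟨⟨h1, h2, h3⟩, h4⟩ := h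
  subst h1
  subst h2
  by_cases hz : da = 0 <;> simp [hz] at h3 h4 <;> simp [Prod.ext_iff] <;> omega

lemma pv_mem_edges (data : List String) (rows cols : Int) (c : Option Char)
    (p : Int × Int) (kv : (Int × Int × Int) × Int) :
    kv ∈ pvEdges data rows cols c p ↔
      ∃ d ∈ pvDirs,
        pvBorder data rows cols c (p.1 + d.1) (p.2 + d.2) = true ∧ pvKV p d = kv := by
  simp only [pvEdges, List.mem_filterMap]
  constructor
  · rintro ⟨d, hd, hsome⟩
    by_cases hb : pvBorder data rows cols c (p.1 + d.1) (p.2 + d.2) = true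
    · rw [if_pos hb] at hsome
      exact ⟨d, hd, hb, Option.some.inj hsome⟩
    · rw [if_neg hb] at hsome
      cases hsome
  · rintro ⟨d, hd, hb, hkv⟩
    exact ⟨d, hd, by rw [if_pos hb, hkv]⟩

lemma pv_M_nodup (data : List String) (rows cols : Int) (c : Option Char)
    {P : List (Int × Int)} (hP : P.Nodup) :
    (pvM data rows cols c P).Nodup := by
  unfold pvM
  rw [List.nodup_flatMap]
  constructor
  · intro p _
    apply List.Nodup.filterMap
    · intro a a' b hba hba'
      have ha : pvBorder data rows cols c (p.1 + a.1) (p.2 + a.2) = true ∧ pvKV p a = b := by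
        by_cases hb : pvBorder data rows cols c (p.1 + a.1) (p.2 + a.2) = true
        · rw [if_pos hb] at hba; exact ⟨hb, Option.some.inj (by simpa using hba)⟩
        · rw [if_neg hb] at hba; cases hba
      have ha' : pvKV p a' = b := by
        by_cases hb : pvBorder data rows cols c (p.1 + a'.1) (p.2 + a'.2) = true
        · rw [if_pos hb] at hba'; exact Option.some.inj (by simpa using hba')
        · rw [if_neg hb] at hba'; cases hba'
      exact (pv_pvKV_inj (ha.2.trans ha'.symm)).2
    · decide
  · refine hP.imp ?_
    intro a b hab kv hka hkb
    obtain ⟨d, _, _, hkv⟩ := (pv_mem_edges data rows cols c a kv).mp hka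
    obtain ⟨d', _, _, hkv'⟩ := (pv_mem_edges data rows cols c b kv).mp hkb
    exact hab ((pv_pvKV_inj (hkv.trans hkv'.symm)).1)

lemma pv_mem_M_iff (data : List String) (rows cols : Int) (c : Option Char)
    (P : List (Int × Int)) (kv : (Int × Int × Int) × Int) :
    kv ∈ pvM data rows cols c P ↔
      ∃ p ∈ P, ∃ d ∈ pvDirs,
        pvBorder data rows cols c (p.1 + d.1) (p.2 + d.2) = true ∧ pvKV p d = kv := by
  simp only [pvM, List.mem_flatMap]
  constructor
  · rintro ⟨p, hp, hmem⟩
    obtain ⟨d, hd, hb, hkv⟩ := (pv_mem_edges data rows cols c p kv).mp hmem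
    exact ⟨p, hp, d, hd, hb, hkv⟩
  · rintro ⟨p, hp, d, hd, hb, hkv⟩
    exact ⟨p, hp, (pv_mem_edges data rows cols c p kv).mpr ⟨d, hd, hb, hkv⟩⟩

lemma pv_pvKV_prev (p d : Int × Int) (hd : d ∈ pvDirs) :
    pvKV (pvPrev p d) d = ((pvKV p d).1, (pvKV p d).2 - 1) := by
  obtain ⟨pa, pb⟩ := p
  simp only [pvDirs, List.mem_cons, List.not_mem_nil, or_false] at hd
  rcases hd with rfl | rfl | rfl | rfl <;>
    norm_num [pvKV, pvPrev, Prod.ext_iff]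

lemma pv_prev_iff (data : List String) (rows cols : Int) (c : Option Char)
    (P : List (Int × Int)) (p d : Int × Int) (hd : d ∈ pvDirs) :
    ((pvKV p d).1, (pvKV p d).2 - 1) ∈ pvM data rows cols c P ↔
      (pvPrev p d ∈ P ∧
       pvBorder data rows cols c ((pvPrev p d).1 + d.1) ((pvPrev p d).2 + d.2) = true) := by
  rw [pv_mem_M_iff]
  constructor
  · rintro ⟨p', hp', d', hd', hb', hkv⟩
    obtain ⟨rfl, rfl⟩ := pv_pvKV_inj (hkv.trans (pv_pvKV_prev p d hd).symm)
    exact ⟨hp', hb'⟩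
  · rintro ⟨hmem, hb⟩
    exact ⟨pvPrev p d, hmem, d, hd, hb, pv_pvKV_prev p d hd⟩

-- the two side counts agree on any duplicate-free cell list --------------------

lemma pv_sidesB_eq_countP (data : List String) (rows cols : Int) (c : Option Char)
    (P : List (Int × Int)) :
    pvSidesB data rows cols c P =
      ((pvM data rows cols c P).countP
        (fun kv => decide ((kv.1, kv.2 - 1) ∉ pvM data rows cols c P)) : Int) := by
  have hcount : ∀ p : Int × Int, (pvEdges data rows cols c p).countP
      (fun kv => decide ((kv.1, kv.2 - 1) ∉ pvM data rows cols c P)) =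
      pvDirs.countP (fun d =>
        pvBorder data rows cols c (p.1 + d.1) (p.2 + d.2) &&
        !((PySem.Set.ofList P).contains (pvPrev p d) &&
          pvBorder data rows cols c ((pvPrev p d).1 + d.1) ((pvPrev p d).2 + d.2))) := by
    intro p
    unfold pvEdges
    rw [List.countP_filterMap]
    apply List.countP_congr
    intro d hd
    cases hb : pvBorder data rows cols c (p.1 + d.1) (p.2 + d.2) with
    | false => simp
    | true =>
      have hiff := pv_prev_iff data rows cols c P p d hd
      simp [hiff, PySem.Set.contains_eq_listContains, List.contains_eq_mem,
        PySem.Set.mem_ofList]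
      try tauto
  unfold pvSidesB
  dsimp only
  rw [PySem.List.foldl_congr_mem _ _
    (fun (sides : Int) p => sides +
      ((pvDirs.countP (fun d =>
        pvBorder data rows cols c (p.1 + d.1) (p.2 + d.2) &&
        !((PySem.Set.ofList P).contains (pvPrev p d) &&
          pvBorder data rows cols c ((pvPrev p d).1 + d.1) ((pvPrev p d).2 + d.2)))) : Int)) _ ?_]
  · rw [PySem.List.foldl_add, zero_add]
    have hflat : (pvM data rows cols c P).countP
        (fun kv => decide ((kv.1, kv.2 - 1) ∉ pvM data rows cols c P)) =
        (P.map (fun p => (pvEdges data rows cols c p).countP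
            (fun kv => decide ((kv.1, kv.2 - 1) ∉ pvM data rows cols c P)))).sum :=
      List.countP_flatMap
    rw [hflat]
    push_cast [Nat.cast_list_sum]
    rw [List.map_map]
    congr 1
    apply List.map_congr_left
    intro p _
    rw [← hcount p]
    rfl
  · intro acc p _
    have hinner : pvDirs.foldl (fun s d =>
        if pvBorder data rows cols c (p.1 + d.1) (p.2 + d.2) then
          if !((PySem.Set.ofList P).contains (pvPrev p d) &&
               pvBorder data rows cols c ((pvPrev p d).1 + d.1) ((pvPrev p d).2 + d.2)) then s + 1
          else s
        else s) acc =
        pvDirs.foldl (fun s d =>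
          if (pvBorder data rows cols c (p.1 + d.1) (p.2 + d.2) &&
              !((PySem.Set.ofList P).contains (pvPrev p d) &&
                pvBorder data rows cols c ((pvPrev p d).1 + d.1) ((pvPrev p d).2 + d.2))) then s + 1
          else s) acc := by
      apply PySem.List.foldl_congr_mem
      intro s d _
      by_cases h1 : pvBorder data rows cols c (p.1 + d.1) (p.2 + d.2) = true <;>
        by_cases h2 : ((PySem.Set.ofList P).contains (pvPrev p d) &&
          pvBorder data rows cols c ((pvPrev p d).1 + d.1) ((pvPrev p d).2 + d.2)) = true <;>
        simp [h1]
    rw [hinner, PySem.List.foldl_if_add_one]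

lemma pv_region_eq (data : List String) (rows cols : Int) (c : Option Char)
    {P : List (Int × Int)} (hP : P.Nodup) :
    pvSidesA (P.foldl (pvAddE data rows cols c) PySem.Dict.empty) =
      pvSidesB data rows cols c P := by
  have hMnd := pv_M_nodup data rows cols c hP
  have hDfold : P.foldl (pvAddE data rows cols c) PySem.Dict.empty =
      (pvM data rows cols c P).foldl pvIns PySem.Dict.empty := by
    unfold pvM
    rw [List.foldl_flatMap]
    rfl
  rw [hDfold]
  have hknd := pv_nodup_keys_foldl_ins (pvM data rows cols c P)
  have hkeys := pv_keys_foldl_ins (pvM data rows cols c P)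
  unfold pvSidesA
  rw [PySem.Dict.items_eq_map_keys _ hknd PySem.Set.empty, List.foldl_map]
  rw [PySem.List.foldl_congr_mem _ _
    (fun (sides : Int) k => sides + (1 +
      ((pvCountAdj (PySem.List.sorted
        (((pvM data rows cols c P).foldl pvIns PySem.Dict.empty).getD k PySem.Set.empty)
        (fun t => t) false)) : Int))) _ ?_]
  · rw [PySem.List.foldl_add, hkeys]
    have hperkey : ∀ k ∈ PySem.Set.ofList ((pvM data rows cols c P).map Prod.fst),
        (fun k => (1 : Int) +
          ((pvCountAdj (PySem.List.sorted
            (((pvM data rows cols c P).foldl pvIns PySem.Dict.empty).getD k PySem.Set.empty)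
            (fun t => t) false)) : Int)) k =
        (fun k => ((((pvM data rows cols c P).filter (fun kv => decide (kv.1 = k))).countP
            (fun kv => decide ((kv.1, kv.2 - 1) ∉ pvM data rows cols c P))) : Int)) k := by
      intro k hk
      simp only
      have hgetD : ((pvM data rows cols c P).foldl pvIns PySem.Dict.empty).getD k PySem.Set.empty
          = PySem.Set.ofList
              (((pvM data rows cols c P).filter (fun kv => decide (kv.1 = k))).map (·.2)) := by
        rw [pv_getD_foldl_ins, PySem.Dict.getD_empty, PySem.Set.ofList_eq_foldl]
        rfl
      have hvnd : (((pvM data rows cols c P).filter (fun kv => decide (kv.1 = k))).map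
          (fun x => x.2)).Nodup := by
        apply List.Nodup.map_on
        · intro x hx y hy hxy
          have hx1 : x.1 = k := by
            have := (List.mem_filter.mp hx).2
            simpa using this
          have hy1 : y.1 = k := by
            have := (List.mem_filter.mp hy).2
            simpa using this
          exact Prod.ext (hx1.trans hy1.symm) hxy
        · exact hMnd.filter _
      have hmemvals : ∀ t : Int,
          (t ∈ ((pvM data rows cols c P).filter (fun kv => decide (kv.1 = k))).map
            (fun x => x.2)) ↔
          (k, t) ∈ pvM data rows cols c P := by
        intro t
        simp only [List.mem_map, List.mem_filter, decide_eq_true_eq]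
        constructor
        · rintro ⟨kv, ⟨hkv, hk1⟩, hk2⟩
          have hkvt : kv = (k, t) := Prod.ext hk1 hk2
          rwa [hkvt] at hkv
        · intro hm
          exact ⟨(k, t), ⟨hm, rfl⟩, rfl⟩
      rw [hgetD, PySem.Set.ofList_eq_self_of_nodup _ hvnd]
      have hpw : (PySem.List.sorted
          (((pvM data rows cols c P).filter (fun kv => decide (kv.1 = k))).map (fun x => x.2))
          (fun t => t) false).Pairwise (· < ·) := by
        rw [← PySem.Set.ofList_eq_self_of_nodup _ hvnd]
        exact PySem.List.sorted_ofList_pairwise_lt _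
      have hne : (((pvM data rows cols c P).filter (fun kv => decide (kv.1 = k))).map
          (fun x => x.2)) ≠ [] := by
        have hk' := (PySem.Set.mem_ofList _ _).mp hk
        obtain ⟨kv, hkv, hfst⟩ := List.mem_map.mp hk'
        intro hnil
        have hmem : kv.2 ∈ (((pvM data rows cols c P).filter
            (fun kv => decide (kv.1 = k))).map (fun x => x.2)) :=
          List.mem_map.mpr ⟨kv, List.mem_filter.mpr ⟨hkv, by simp [hfst]⟩, rfl⟩
        rw [hnil] at hmem
        simp at hmem
      obtain ⟨a, l, hsl⟩ : ∃ a l, PySem.List.sorted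
          (((pvM data rows cols c P).filter (fun kv => decide (kv.1 = k))).map (fun x => x.2))
          (fun t => t) false = a :: l := by
        cases hs : PySem.List.sorted
            (((pvM data rows cols c P).filter (fun kv => decide (kv.1 = k))).map (fun x => x.2))
            (fun t => t) false with
        | nil => exact absurd ((PySem.List.sorted_eq_nil_iff _ _ _).mp hs) hne
        | cons a l => exact ⟨a, l, rfl⟩
      have hmemS : ∀ x : Int, (x ∈ (a :: l)) ↔
          (x ∈ ((pvM data rows cols c P).filter (fun kv => decide (kv.1 = k))).map
            (fun x => x.2)) := by
        intro x
        rw [← hsl]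
        exact PySem.List.mem_sorted _ (fun t => t) false x
      have hcg : List.countP (fun t => decide ((t - 1) ∉ (a :: l))) (a :: l) =
          List.countP (fun t => decide ((k, t - 1) ∉ pvM data rows cols c P)) (a :: l) := by
        apply List.countP_congr
        intro x _
        simp only [decide_eq_true_eq]
        rw [hmemS (x - 1), hmemvals (x - 1)]
      have hperm : List.countP (fun t => decide ((k, t - 1) ∉ pvM data rows cols c P)) (a :: l) =
          List.countP (fun t => decide ((k, t - 1) ∉ pvM data rows cols c P))
            (((pvM data rows cols c P).filter (fun kv => decide (kv.1 = k))).map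
              (fun x => x.2)) := by
        apply List.Perm.countP_eq
        rw [← hsl]
        exact PySem.List.sorted_perm _ _ _
      have hmap : List.countP (fun t => decide ((k, t - 1) ∉ pvM data rows cols c P))
            (((pvM data rows cols c P).filter (fun kv => decide (kv.1 = k))).map
              (fun x => x.2)) =
          List.countP (fun kv => decide ((kv.1, kv.2 - 1) ∉ pvM data rows cols c P))
            ((pvM data rows cols c P).filter (fun kv => decide (kv.1 = k))) := by
        rw [List.countP_map]
        apply List.countP_congr
        intro kv hkv
        have hk1 : kv.1 = k := by
          have := (List.mem_filter.mp hkv).2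
          simpa using this
        simp [Function.comp, hk1]
      have hNat : 1 + pvCountAdj (a :: l) =
          List.countP (fun kv => decide ((kv.1, kv.2 - 1) ∉ pvM data rows cols c P))
            ((pvM data rows cols c P).filter (fun kv => decide (kv.1 = k))) := by
        rw [pv_starts_eq l a (hsl ▸ hpw), hcg, hperm, hmap]
      rw [hsl]
      push_cast [← hNat]
      ring
    rw [List.map_congr_left hperkey]
    rw [pv_sidesB_eq_countP data rows cols c P]
    rw [← pv_countP_partition (fun kv => decide ((kv.1, kv.2 - 1) ∉ pvM data rows cols c P))
        (pvM data rows cols c P) (PySem.Set.ofList ((pvM data rows cols c P).map Prod.fst))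
        (PySem.Set.nodup_ofList _)
        (fun kv hkv => (PySem.Set.mem_ofList _ _).mpr (List.mem_map_of_mem hkv))]
    push_cast [Nat.cast_list_sum]
    rw [List.map_map]
    simp only [Function.comp_def, zero_add]
  · intro acc kS hkS
    dsimp only
    rw [PySem.List.foldl_ite_add_one, pv_countAdj_range]
    ring

-- one visit --------------------------------------------------------------------

lemma pv_visit_eq (data : List String) (x y : Int) (v : List (List Bool))
    (hs : pvShape data.length data.headI.toList.length v)
    (hx : 0 ≤ x ∧ x < (data.length : Int))
    (hy : 0 ≤ y ∧ y < (data.headI.toList.length : Int)) :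
    pvVisitA data (x, y) v =
      ((((pvFloodB data (data.length : Int) (data.headI.toList.length : Int)
            (pvCharAt data x y) (((data.length : Int)).toNat * ((data.headI.toList.length : Int)).toNat + 1)
            [(x, y)] (pvSetV v x y) []).1.length : Int),
        pvSidesB data (data.length : Int) (data.headI.toList.length : Int) (pvCharAt data x y)
          (pvFloodB data (data.length : Int) (data.headI.toList.length : Int)
            (pvCharAt data x y) (((data.length : Int)).toNat * ((data.headI.toList.length : Int)).toNat + 1)
            [(x, y)] (pvSetV v x y) []).1),
       (pvFloodB data (data.length : Int) (data.headI.toList.length : Int)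
          (pvCharAt data x y) (((data.length : Int)).toNat * ((data.headI.toList.length : Int)).toNat + 1)
          [(x, y)] (pvSetV v x y) []).2) ∧
    pvShape data.length data.headI.toList.length (pvVisitA data (x, y) v).2 := by
  have hR : ((data.length : Int)).toNat = data.length := Int.toNat_natCast _
  have hC : ((data.headI.toList.length : Int)).toNat = data.headI.toList.length :=
    Int.toNat_natCast _
  have hs1 : pvShape ((data.length : Int)).toNat ((data.headI.toList.length : Int)).toNat
      (pvSetV v x y) := by
    rw [hR, hC]
    exact pv_shape_setV hs x y
  have hvis1 : ∀ r ∈ [(x, y)], pvGetV (pvSetV v x y) r.1 r.2 = true := by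
    intro r hr
    obtain rfl := List.mem_singleton.mp hr
    have hx' : x.toNat < data.length := by omega
    have hy' : y.toNat < data.headI.toList.length := by omega
    exact pv_getV_setV_self hs x y hx' hy'
  obtain ⟨hnd, hsh, _⟩ := pv_floodB_inv data (data.length : Int) (data.headI.toList.length : Int)
    (pvCharAt data x y) (((data.length : Int)).toNat * ((data.headI.toList.length : Int)).toNat + 1)
    [(x, y)] (pvSetV v x y) hs1 (List.nodup_singleton _) hvis1
  constructor
  · show pvVisitA data (x, y) v = _
    unfold pvVisitA
    dsimp only
    rw [pv_bfsA_eq]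
    dsimp only
    rw [pv_region_eq data (data.length : Int) (data.headI.toList.length : Int)
      (pvCharAt data x y) hnd]
    rw [zero_add]
  · unfold pvVisitA
    dsimp only
    rw [pv_bfsA_eq]
    dsimp only
    rw [← hR, ← hC]
    exact hsh

-- outer double loop ------------------------------------------------------------

def pvBodyA (data : List String) (i : Int) (st : Int × List (List Bool)) (j : Int) :
    Int × List (List Bool) :=
  if !pvGetV st.2 i j then
    let r := pvVisitA data (i, j) st.2
    (st.1 + r.1.1 * r.1.2, r.2)
  else st

def pvBodyB (data : List String) (i : Int) (st : Int × List (List Bool)) (j : Int) :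
    Int × List (List Bool) :=
  if !pvGetV st.2 i j then
    let c := pvCharAt data i j
    let r := pvFloodB data (data.length : Int) (data.headI.toList.length : Int) c
      (((data.length : Int)).toNat * ((data.headI.toList.length : Int)).toNat + 1) [(i, j)]
      (pvSetV st.2 i j) []
    (st.1 + (r.1.length : Int) * pvSidesB data (data.length : Int) (data.headI.toList.length : Int) c r.1, r.2)
  else st

lemma pv_body_eq (data : List String) (i j : Int) (st : Int × List (List Bool))
    (hs : pvShape data.length data.headI.toList.length st.2)
    (hi : 0 ≤ i ∧ i < (data.length : Int)) (hj : 0 ≤ j ∧ j < (data.headI.toList.length : Int)) :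
    pvBodyA data i st j = pvBodyB data i st j ∧
    pvShape data.length data.headI.toList.length (pvBodyA data i st j).2 := by
  cases hv : pvGetV st.2 i j with
  | true =>
    have h1 : pvBodyA data i st j = st := by simp [pvBodyA, hv]
    have h2 : pvBodyB data i st j = st := by simp [pvBodyB, hv]
    rw [h1, h2]
    exact ⟨rfl, hs⟩
  | false =>
    obtain ⟨hveq, hvsh⟩ := pv_visit_eq data i j st.2 hs hi hj
    have h1 : pvBodyA data i st j =
        (st.1 + (pvVisitA data (i, j) st.2).1.1 * (pvVisitA data (i, j) st.2).1.2,
         (pvVisitA data (i, j) st.2).2) := by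
      simp [pvBodyA, hv]
    constructor
    · rw [h1, hveq]
      simp [pvBodyB, hv]
    · rw [h1]
      dsimp only
      rw [hveq] at hvsh ⊢
      exact hvsh

lemma pv_colfold_eq (data : List String) (i : Int) (hi : 0 ≤ i ∧ i < (data.length : Int)) :
    ∀ (lj : List Int), (∀ j ∈ lj, 0 ≤ j ∧ j < (data.headI.toList.length : Int)) →
    ∀ (st : Int × List (List Bool)), pvShape data.length data.headI.toList.length st.2 →
    lj.foldl (pvBodyA data i) st = lj.foldl (pvBodyB data i) st ∧
    pvShape data.length data.headI.toList.length (lj.foldl (pvBodyA data i) st).2 := by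
  intro lj
  induction lj with
  | nil => intro _ st hsh; exact ⟨rfl, hsh⟩
  | cons j lj ih =>
    intro hlj st hsh
    have hj := hlj j List.mem_cons_self
    obtain ⟨hbe, hbs⟩ := pv_body_eq data i j st hsh hi hj
    simp only [List.foldl_cons]
    obtain ⟨ihe, ihs⟩ := ih (fun j hj => hlj j (List.mem_cons_of_mem _ hj)) (pvBodyA data i st j) hbs
    exact ⟨by rw [← hbe, ihe], ihs⟩

lemma pv_rowfold_eq (data : List String) :
    ∀ (li : List Int), (∀ i ∈ li, 0 ≤ i ∧ i < (data.length : Int)) →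
    ∀ (st : Int × List (List Bool)), pvShape data.length data.headI.toList.length st.2 →
    li.foldl (fun st i => (PySem.List.pyRange 0 (data.headI.toList.length : Int) 1).foldl (pvBodyA data i) st) st =
      li.foldl (fun st i => (PySem.List.pyRange 0 (data.headI.toList.length : Int) 1).foldl (pvBodyB data i) st) st ∧
    pvShape data.length data.headI.toList.length
      (li.foldl (fun st i => (PySem.List.pyRange 0 (data.headI.toList.length : Int) 1).foldl (pvBodyA data i) st) st).2 := by
  intro li
  induction li with
  | nil => intro _ st hsh; exact ⟨rfl, hsh⟩
  | cons i li ih =>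
    intro hli st hsh
    have hi := hli i List.mem_cons_self
    have hcols : ∀ j ∈ PySem.List.pyRange 0 (data.headI.toList.length : Int) 1,
        0 ≤ j ∧ j < (data.headI.toList.length : Int) := by
      intro j hj
      exact PySem.List.mem_pyRange_one.mp hj
    obtain ⟨hce, hcs⟩ := pv_colfold_eq data i hi (PySem.List.pyRange 0 (data.headI.toList.length : Int) 1)
      hcols st hsh
    simp only [List.foldl_cons]
    obtain ⟨ihe, ihs⟩ := ih (fun i hi => hli i (List.mem_cons_of_mem _ hi)) _ hcs
    exact ⟨by rw [← hce, ihe], ihs⟩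

-- ===== VERDICT (by name: the statement is the Claim_ definition above) =====
theorem part_2_spec : Claim_equal_part_2 := by
  intro data _ _
  unfold Spec_part_2
  have hA : part_2 data = ((PySem.List.pyRange 0 (data.length : Int) 1).foldl
      (fun st i => (PySem.List.pyRange 0 (data.headI.toList.length : Int) 1).foldl
        (pvBodyA data i) st)
      ((0 : Int), List.replicate data.length (List.replicate data.headI.toList.length false))).1 :=
    rfl
  have hB : part_2_alt data = ((PySem.List.pyRange 0 (data.length : Int) 1).foldl
      (fun st i => (PySem.List.pyRange 0 (data.headI.toList.length : Int) 1).foldl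
        (pvBodyB data i) st)
      ((0 : Int), List.replicate data.length (List.replicate data.headI.toList.length false))).1 :=
    rfl
  rw [hA, hB]
  have hsh0 : pvShape data.length data.headI.toList.length
      (List.replicate data.length (List.replicate data.headI.toList.length false)) := by
    constructor
    · exact List.length_replicate
    · intro i h
      rw [List.getElem_replicate]
      exact List.length_replicate
  have hrows : ∀ i ∈ PySem.List.pyRange 0 (data.length : Int) 1,
      0 ≤ i ∧ i < (data.length : Int) := by
    intro i hi
    exact PySem.List.mem_pyRange_one.mp hi
  obtain ⟨he, _⟩ := pv_rowfold_eq data (PySem.List.pyRange 0 (data.length : Int) 1) hrows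
    ((0 : Int), List.replicate data.length (List.replicate data.headI.toList.length false)) hsh0
  rw [he]
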